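-- pv_equiv track=rewrite | github.com/loeiten/Nand2Tetris-FPGA | tools/Assembler/code.py | dest
-- ===== SOURCE A (Python) =====
-- def dest(s):
--     a = 0
--     d = 0
--     m = 0
--     for c in s:
--         if c == "M":
--             m = 1
--         if c == "D":
--             d = 1
--         if c == "A":
--             a = 1
--
--     return str(a) + str(d) + str(m)
-- ===== SOURCE B (Python) =====
-- def dest(s):
--     present = set(s)
--     return "".join("1" if c in present else "0" for c in "ADM")
-- ===== Notes on version B (the rewrite author's own statement) =====
-- stated objective: idiomatic
-- what changed: Instead of scanning the input with three per-character flag branches, B builds a set of the input's characters once and then walks the three-letter destination template, joining one digit per template character.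
import Mathlib
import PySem

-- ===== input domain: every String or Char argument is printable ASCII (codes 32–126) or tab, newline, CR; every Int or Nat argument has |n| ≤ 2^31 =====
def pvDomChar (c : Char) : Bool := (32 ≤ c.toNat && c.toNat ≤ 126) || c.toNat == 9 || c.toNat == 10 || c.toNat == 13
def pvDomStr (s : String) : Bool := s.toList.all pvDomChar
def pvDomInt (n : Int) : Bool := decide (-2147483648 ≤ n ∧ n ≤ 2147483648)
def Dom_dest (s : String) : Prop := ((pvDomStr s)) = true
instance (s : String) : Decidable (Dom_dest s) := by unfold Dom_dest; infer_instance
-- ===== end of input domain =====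

-- B builds a set of s's characters once, then walks the template "ADM" emitting '1'/'0' (idiomatic).

-- ===== PORT A =====
def dest (s : String) : String :=
  let st := s.toList.foldl (fun (st : Int × Int × Int) c =>
    let a := st.1
    let d := st.2.1
    let m := st.2.2
    let m := if c = 'M' then 1 else m
    let d := if c = 'D' then 1 else d
    let a := if c = 'A' then 1 else a
    (a, d, m)) (0, 0, 0)
  PySem.Int.toStr st.1 ++ PySem.Int.toStr st.2.1 ++ PySem.Int.toStr st.2.2

-- ===== PORT B =====
def dest_alt (s : String) : String :=
  let present : PySem.Set Char := PySem.Set.ofList s.toList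
  String.join (("ADM".toList).map (fun c => if PySem.Set.contains present c then "1" else "0"))

-- ===== PRECONDITION & SPEC =====
def Spec_dest (s : String) (out : String) : Prop := out = dest_alt s
instance (s : String) (out : String) : Decidable (Spec_dest s out) := by unfold Spec_dest; infer_instance

-- ===== CLAIM (what is proved, stated in full; the proofs are below) =====
def Claim_equal_dest : Prop := ∀ (s : String), Dom_dest s → Spec_dest s (dest s)

-- ===== LEMMAS AND PROOFS =====

theorem dest_fold_eq (l : List Char) (a d m : Int) :
    l.foldl (fun (st : Int × Int × Int) c =>
      let a := st.1
      let d := st.2.1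
      let m := st.2.2
      let m := if c = 'M' then 1 else m
      let d := if c = 'D' then 1 else d
      let a := if c = 'A' then 1 else a
      (a, d, m)) (a, d, m)
    = (if 'A' ∈ l then 1 else a, if 'D' ∈ l then 1 else d, if 'M' ∈ l then 1 else m) := by
  induction l generalizing a d m with
  | nil => simp
  | cons c t ih =>
    have key : ∀ (ch : Char) (x : Int),
        (if ch ∈ t then (1 : Int) else if c = ch then 1 else x)
          = if ch = c ∨ ch ∈ t then 1 else x := by
      intro ch x
      by_cases h1 : ch ∈ t <;> by_cases h2 : c = ch <;> simp [h1, h2, eq_comm]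
    simp only [List.foldl_cons, ih, List.mem_cons, key]

-- ===== VERDICT (by name: the statement is the Claim_ definition above) =====
theorem dest_spec : Claim_equal_dest := by
  intro s _
  show dest s = dest_alt s
  unfold dest dest_alt
  simp only [dest_fold_eq]
  have hA : PySem.Set.contains (PySem.Set.ofList s.toList) 'A' = decide ('A' ∈ s.toList) := by
    simp [PySem.Set.contains_iff, PySem.Set.mem_ofList]
  have hD : PySem.Set.contains (PySem.Set.ofList s.toList) 'D' = decide ('D' ∈ s.toList) := by
    simp [PySem.Set.contains_iff, PySem.Set.mem_ofList]
  have hM : PySem.Set.contains (PySem.Set.ofList s.toList) 'M' = decide ('M' ∈ s.toList) := by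
    simp [PySem.Set.contains_iff, PySem.Set.mem_ofList]
  by_cases h1 : 'A' ∈ s.toList <;> by_cases h2 : 'D' ∈ s.toList <;> by_cases h3 : 'M' ∈ s.toList <;>
    simp [h1, h2, h3, hA, hD, hM, String.join, PySem.Int.toStr] <;> decide
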